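-- pv_equiv track=rewrite | github.com/AntaresSimulatorTeam/AntaREST | antarest/storage/repository/filesystem/config/model.py | transform_name_to_id
-- ===== SOURCE A (Python) =====
-- def transform_name_to_id(name: str) -> str:
--     """This transformation was taken from the cpp Antares Simulator.."""
--     duppl = False
--     study_id = ""
--     for c in name:
--         if (
--             (c >= "a" and c <= "z")
--             or (c >= "A" and c <= "Z")
--             or (c >= "0" and c <= "9")
--             or c == "_"
--             or c == "-"
--             or c == "("
--             or c == ")"
--             or c == ","
--             or c == "&"
--             or c == " "
--         ):
--             study_id += c
--             duppl = False
--         else: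
--             if not duppl:
--                 study_id += " "
--                 duppl = True
--
--     return study_id.strip().lower()
-- ===== SOURCE B (Python) =====
-- import re
--
-- _INVALID_RUN = re.compile(r"[^a-zA-Z0-9_()\-, &]+")
--
-- def transform_name_to_id(name: str) -> str:
--     return _INVALID_RUN.sub(" ", name).strip().lower()
-- ===== Notes on version B (the rewrite author's own statement) =====
-- stated objective: idiomatic
-- what changed: Replaces the character-by-character loop with a duplicate-space flag by a single precompiled regex substitution that collapses each run of disallowed characters to one space, then strip().lower().
import Mathlib
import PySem

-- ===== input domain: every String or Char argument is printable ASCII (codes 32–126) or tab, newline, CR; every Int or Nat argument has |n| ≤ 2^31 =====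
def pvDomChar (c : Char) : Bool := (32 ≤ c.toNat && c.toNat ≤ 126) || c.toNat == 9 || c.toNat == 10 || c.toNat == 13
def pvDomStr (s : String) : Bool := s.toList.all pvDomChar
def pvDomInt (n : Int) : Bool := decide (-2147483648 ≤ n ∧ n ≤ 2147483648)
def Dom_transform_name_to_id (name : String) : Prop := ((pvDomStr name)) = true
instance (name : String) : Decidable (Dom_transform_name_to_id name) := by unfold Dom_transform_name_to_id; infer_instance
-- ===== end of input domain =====

-- B replaces A's char-by-char loop with a duplicate-space flag by one regex
-- substitution collapsing each run of disallowed chars to a single space (idiomatic; return value only).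

-- ===== PORT A =====
-- the loop 'for c in name' with state (duppl, study_id); study_id kept as List Char
def transformNameToIdStep (st : Bool × List Char) (c : Char) : Bool × List Char :=
  if ('a' ≤ c ∧ c ≤ 'z') ∨ ('A' ≤ c ∧ c ≤ 'Z') ∨ ('0' ≤ c ∧ c ≤ '9') ∨
     c = '_' ∨ c = '-' ∨ c = '(' ∨ c = ')' ∨ c = ',' ∨ c = '&' ∨ c = ' ' then
    (false, st.2 ++ [c])
  else
    if !st.1 then (true, st.2 ++ [' ']) else (st.1, st.2)

def transform_name_to_id (name : String) : String :=
  String.ofList (PySem.Chars.lower (PySem.Chars.strip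
    ((name.toList.foldl transformNameToIdStep (false, [])).2)))

-- ===== PORT B =====
-- the regex character class [^a-zA-Z0-9_()\-, &]: true iff c is OUTSIDE the class
def invalidRunChar (c : Char) : Bool :=
  !(('a' ≤ c && c ≤ 'z') || ('A' ≤ c && c ≤ 'Z') || ('0' ≤ c && c ≤ '9') ||
    c == '_' || c == '(' || c == ')' || c == '-' || c == ',' || c == ' ' || c == '&')

-- re.sub(r"[^...]+", " ", ·): each maximal run of class members becomes one ' '
def subInvalidRuns : List Char → List Char
  | [] => []
  | c :: rest =>
    if invalidRunChar c then
      ' ' :: subInvalidRuns (rest.dropWhile invalidRunChar)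
    else
      c :: subInvalidRuns rest
termination_by cs => cs.length
decreasing_by
  · simpa using Nat.lt_succ_of_le (List.length_dropWhile_le _ _)
  · simp

def transform_name_to_id_alt (name : String) : String :=
  String.ofList (PySem.Chars.lower (PySem.Chars.strip (subInvalidRuns name.toList)))

-- ===== PRECONDITION & SPEC =====
def Spec_transform_name_to_id (name : String) (out : String) : Prop := out = transform_name_to_id_alt name
instance (name : String) (out : String) : Decidable (Spec_transform_name_to_id name out) := by unfold Spec_transform_name_to_id; infer_instance

-- ===== CLAIM (what is proved, stated in full; the proofs are below) =====
def Claim_equal_transform_name_to_id : Prop := ∀ (name : String), Dom_transform_name_to_id name → Spec_transform_name_to_id name (transform_name_to_id name)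

-- ===== LEMMAS AND PROOFS =====

-- A's branch condition and B's class membership are the same test
theorem invalid_iff (c : Char) :
    invalidRunChar c = true ↔
    ¬ (('a' ≤ c ∧ c ≤ 'z') ∨ ('A' ≤ c ∧ c ≤ 'Z') ∨ ('0' ≤ c ∧ c ≤ '9') ∨
       c = '_' ∨ c = '-' ∨ c = '(' ∨ c = ')' ∨ c = ',' ∨ c = '&' ∨ c = ' ') := by
  simp [invalidRunChar, imp_iff_not_or]
  tauto

-- A's loop from state (d, acc) appends goA d cs
def goA (d : Bool) : List Char → List Char
  | [] => []
  | c :: cs =>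
    if invalidRunChar c then (if d then goA true cs else ' ' :: goA true cs)
    else c :: goA false cs

theorem step_invalid (c : Char) (h : invalidRunChar c = true) (d : Bool) (acc : List Char) :
    transformNameToIdStep (d, acc) c = if d then (d, acc) else (true, acc ++ [' ']) := by
  unfold transformNameToIdStep
  rw [if_neg ((invalid_iff c).mp h)]
  cases d <;> simp

theorem step_valid (c : Char) (h : ¬ invalidRunChar c = true) (d : Bool) (acc : List Char) :
    transformNameToIdStep (d, acc) c = (false, acc ++ [c]) := by
  unfold transformNameToIdStep
  rw [if_pos (not_not.mp (fun hn => h ((invalid_iff c).mpr hn)))]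

theorem foldl_step_eq (cs : List Char) : ∀ (d : Bool) (acc : List Char),
    (cs.foldl transformNameToIdStep (d, acc)).2 = acc ++ goA d cs := by
  induction cs with
  | nil => simp [goA]
  | cons c cs ih =>
    intro d acc
    by_cases h : invalidRunChar c = true
    · simp only [List.foldl_cons, step_invalid c h]
      cases d <;> simp [goA, h, ih]
    · simp only [List.foldl_cons, step_valid c h]
      simp [goA, h, ih]

theorem goA_eq_sub (cs : List Char) :
    goA false cs = subInvalidRuns cs ∧
    goA true cs = subInvalidRuns (cs.dropWhile invalidRunChar) := by
  induction cs with
  | nil => simp [goA, subInvalidRuns]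
  | cons c cs ih =>
    by_cases h : invalidRunChar c = true
    · constructor
      · simp [goA, subInvalidRuns, h, ih.2]
      · simp [goA, List.dropWhile, h, ih.2]
    · constructor
      · simp [goA, subInvalidRuns, h, ih.1]
      · simp [goA, subInvalidRuns, List.dropWhile, h, ih.1]

-- ===== VERDICT (by name: the statement is the Claim_ definition above) =====
theorem transform_name_to_id_spec : Claim_equal_transform_name_to_id := by
  intro name _
  unfold Spec_transform_name_to_id transform_name_to_id transform_name_to_id_alt
  rw [foldl_step_eq, (goA_eq_sub name.toList).1]
  simp
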